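-- pv_equiv track=rewrite | github.com/elikrok/cmmc_tool | scanner/config_checker.py | _has_ssh_only_transport
-- ===== SOURCE A (Python) =====
-- def _has_ssh_only_transport(lines):
--     ssh_ok = False
--     in_vty = False
--     for raw in lines:
--         low = raw.strip().lower()
--         if low.startswith('line vty'):
--             in_vty = True
--             continue
--         if in_vty and low.startswith(('line ', 'interface ', 'router ', 'hostname', 'aaa ', 'ip ')):
--             in_vty = False
--         if in_vty and 'transport input ssh' in low:
--             ssh_ok = True
--         if in_vty and 'transport input telnet' in low:
--             return False
--     return ssh_ok
-- ===== SOURCE B (Python) =====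
-- def _has_ssh_only_transport(lines):
--     # Pass 1: collect the vty blocks (normalized lines between a 'line vty'
--     # header and the next terminating section header).
--     blocks = []
--     current = None
--     for raw in lines:
--         low = raw.strip().lower()
--         if low.startswith('line vty'):
--             current = []
--             blocks.append(current)
--         elif current is not None:
--             if low.startswith(('line ', 'interface ', 'router ', 'hostname', 'aaa ', 'ip ')):
--                 current = None
--             else:
--                 current.append(low)
--     # Pass 2: judge the blocks in order.
--     ssh_ok = False
--     for block in blocks:
--         for low in block:
--             if 'transport input telnet' in low:
--                 return False
--             if 'transport input ssh' in low:
--                 ssh_ok = True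
--     return ssh_ok
-- ===== Notes on version B (the rewrite author's own statement) =====
-- stated objective: alternative
-- what changed: Replaces A's single-pass two-flag state machine with a two-pass decomposition: first collect the vty blocks, then judge the blocks (telnet short-circuit, ssh flag) in order.
import Mathlib
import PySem

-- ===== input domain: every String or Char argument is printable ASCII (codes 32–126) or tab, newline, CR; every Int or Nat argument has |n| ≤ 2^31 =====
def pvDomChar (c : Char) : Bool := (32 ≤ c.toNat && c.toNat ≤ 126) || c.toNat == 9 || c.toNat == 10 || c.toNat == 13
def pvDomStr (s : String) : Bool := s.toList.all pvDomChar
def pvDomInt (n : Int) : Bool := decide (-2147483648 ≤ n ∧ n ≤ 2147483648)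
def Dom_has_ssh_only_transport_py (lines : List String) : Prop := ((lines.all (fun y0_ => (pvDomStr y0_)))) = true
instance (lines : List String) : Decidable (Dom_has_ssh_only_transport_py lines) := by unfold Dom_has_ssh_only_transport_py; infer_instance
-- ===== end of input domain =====

-- B is an alternative decomposition of A (two passes: collect vty blocks, then judge them); same cost.

-- ===== PORT A =====
-- the for-loop of A with its two mutable flags (ssh_ok, in_vty); returning false models the early 'return False'
def pvLoopA : List String → Bool → Bool → Bool
  | [], ssh_ok, _ => ssh_ok
  | raw :: rest, ssh_ok, in_vty =>
    let low := PySem.Str.lower (PySem.Str.strip raw)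
    if PySem.Str.startswith low "line vty" then
      pvLoopA rest ssh_ok true
    else
      let in_vty2 := if in_vty && (PySem.Str.startswith low "line " || PySem.Str.startswith low "interface " ||
          PySem.Str.startswith low "router " || PySem.Str.startswith low "hostname" ||
          PySem.Str.startswith low "aaa " || PySem.Str.startswith low "ip ") then false else in_vty
      let ssh2 := if in_vty2 && PySem.Str.isIn "transport input ssh" low then true else ssh_ok
      if in_vty2 && PySem.Str.isIn "transport input telnet" low then false
      else pvLoopA rest ssh2 in_vty2

def has_ssh_only_transport_py (lines : List String) : Bool := pvLoopA lines false false

-- ===== PORT B =====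
def pvTermPrefixes : List String := ["line ", "interface ", "router ", "hostname", "aaa ", "ip "]

-- Pass 1 of B: build the list of vty blocks ('current' is the still-open block, flushed when closed or at the end)
def pvBuild : List String → List (List String) → Option (List String) → List (List String)
  | [], blocks, cur => match cur with | none => blocks | some c => blocks ++ [c]
  | raw :: rest, blocks, cur =>
    let low := PySem.Str.lower (PySem.Str.strip raw)
    if PySem.Str.startswith low "line vty" then
      match cur with
      | none => pvBuild rest blocks (some [])
      | some c => pvBuild rest (blocks ++ [c]) (some [])
    else
      match cur with
      | none => pvBuild rest blocks none
      | some c =>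
        if pvTermPrefixes.any (fun p => PySem.Str.startswith low p) then pvBuild rest (blocks ++ [c]) none
        else pvBuild rest blocks (some (c ++ [low]))

-- Pass 2 of B, inner loop: none models the early 'return False' on telnet
def pvScanLines : List String → Bool → Option Bool
  | [], ssh => some ssh
  | low :: rest, ssh =>
    if PySem.Str.isIn "transport input telnet" low then none
    else pvScanLines rest (if PySem.Str.isIn "transport input ssh" low then true else ssh)

-- Pass 2 of B, outer loop over the blocks
def pvScanBlocks : List (List String) → Bool → Bool
  | [], ssh => ssh
  | b :: bs, ssh =>
    match pvScanLines b ssh with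
    | none => false
    | some s => pvScanBlocks bs s

def has_ssh_only_transport_py_alt (lines : List String) : Bool :=
  pvScanBlocks (pvBuild lines [] none) false

-- ===== PRECONDITION & SPEC =====
def Spec_has_ssh_only_transport_py (lines : List String) (out : Bool) : Prop := out = has_ssh_only_transport_py_alt lines
instance (lines : List String) (out : Bool) : Decidable (Spec_has_ssh_only_transport_py lines out) := by unfold Spec_has_ssh_only_transport_py; infer_instance

-- ===== CLAIM (what is proved, stated in full; the proofs are below) =====
def Claim_equal_has_ssh_only_transport_py : Prop := ∀ (lines : List String), Dom_has_ssh_only_transport_py lines → Spec_has_ssh_only_transport_py lines (has_ssh_only_transport_py lines)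

-- ===== LEMMAS AND PROOFS =====

-- pvBuild only appends to the accumulated blocks
theorem pvBuild_blocks (ls : List String) (blocks : List (List String)) (cur : Option (List String)) :
    pvBuild ls blocks cur = blocks ++ pvBuild ls [] cur := by
  induction ls generalizing blocks cur with
  | nil => cases cur <;> simp [pvBuild]
  | cons raw rest ih =>
    cases cur with
    | none =>
      simp only [pvBuild]
      split
      · rw [ih blocks (some []), ih [] (some [])]
      · rw [ih blocks none, ih [] none]
    | some c =>
      simp only [pvBuild]
      split
      · rw [ih (blocks ++ [c]) (some []), ih ([] ++ [c]) (some [])]; simp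
      · split
        · rw [ih (blocks ++ [c]) none, ih ([] ++ [c]) none]; simp
        · rw [ih blocks _, ih [] _]

theorem pvScanLines_append (xs ys : List String) (s : Bool) :
    pvScanLines (xs ++ ys) s =
      match pvScanLines xs s with
      | none => none
      | some t => pvScanLines ys t := by
  induction xs generalizing s with
  | nil => simp [pvScanLines]
  | cons x xs ih =>
    simp only [List.cons_append, pvScanLines]
    split
    · rfl
    · exact ih _

-- once the open block contains telnet, B ends up returning false whatever follows
theorem pvDead (ls : List String) (acc : List String) (s : Bool)
    (h : pvScanLines acc s = none) :
    pvScanBlocks (pvBuild ls [] (some acc)) s = false := by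
  induction ls generalizing acc with
  | nil => simp [pvBuild, pvScanBlocks, h]
  | cons raw rest ih =>
    simp only [pvBuild]
    split
    · rw [pvBuild_blocks rest ([] ++ [acc]) (some [])]
      simp [pvScanBlocks, h]
    · split
      · rw [pvBuild_blocks rest ([] ++ [acc]) none]
        simp [pvScanBlocks, h]
      · apply ih
        rw [pvScanLines_append, h]

-- the two B-side terminator tests coincide with A's || chain
theorem pvTerm_eq (low : String) :
    pvTermPrefixes.any (fun p => PySem.Str.startswith low p) =
      (PySem.Str.startswith low "line " || PySem.Str.startswith low "interface " ||
       PySem.Str.startswith low "router " || PySem.Str.startswith low "hostname" ||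
       PySem.Str.startswith low "aaa " || PySem.Str.startswith low "ip ") := by
  simp [pvTermPrefixes, List.any, Bool.or_assoc]

-- the joint loop invariant: outside a vty block A's loop equals B restarted on the rest;
-- inside, A's flag ssh is what rescanning the open block acc from B's entry value s0 yields
theorem pvMain (ls : List String) :
    (∀ ssh, pvLoopA ls ssh false = pvScanBlocks (pvBuild ls [] none) ssh) ∧
    (∀ acc s0 ssh, pvScanLines acc s0 = some ssh →
      pvLoopA ls ssh true = pvScanBlocks (pvBuild ls [] (some acc)) s0) := by
  induction ls with
  | nil =>
    constructor
    · intro ssh; simp [pvLoopA, pvBuild, pvScanBlocks]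
    · intro acc s0 ssh h; simp [pvLoopA, pvBuild, pvScanBlocks, h]
  | cons raw rest ih =>
    obtain ⟨ihF, ihT⟩ := ih
    constructor
    · intro ssh
      simp only [pvLoopA, pvBuild]
      split
      · exact ihT [] ssh ssh rfl
      · simp only [Bool.false_and, reduceIte]
        exact ihF ssh
    · intro acc s0 ssh h
      simp only [pvLoopA, pvBuild]
      split
      · -- 'line vty': flush acc, open a fresh block
        rw [pvBuild_blocks rest ([] ++ [acc]) (some [])]
        simp only [pvScanBlocks, List.nil_append, List.cons_append, h]
        exact ihT [] ssh ssh rfl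
      · rw [pvTerm_eq]
        cases hterm : (PySem.Str.startswith (PySem.Str.lower (PySem.Str.strip raw)) "line " ||
            PySem.Str.startswith (PySem.Str.lower (PySem.Str.strip raw)) "interface " ||
            PySem.Str.startswith (PySem.Str.lower (PySem.Str.strip raw)) "router " ||
            PySem.Str.startswith (PySem.Str.lower (PySem.Str.strip raw)) "hostname" ||
            PySem.Str.startswith (PySem.Str.lower (PySem.Str.strip raw)) "aaa " ||
            PySem.Str.startswith (PySem.Str.lower (PySem.Str.strip raw)) "ip ") with
        | true =>
          -- terminator: A drops in_vty, the checks are dead; B closes the block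
          simp only [Bool.true_and, hterm, Bool.false_and, reduceIte]
          rw [pvBuild_blocks rest ([] ++ [acc]) none]
          simp only [pvScanBlocks, List.nil_append, List.cons_append, h]
          exact ihF ssh
        | false =>
          -- ordinary line inside the block
          simp only [Bool.true_and, hterm, reduceIte]
          cases htel : PySem.Str.isIn "transport input telnet" (PySem.Str.lower (PySem.Str.strip raw)) with
          | true =>
            simp only [htel, reduceCtorEq, if_false, if_true, Bool.true_and, Bool.false_and, reduceIte]
            rw [eq_comm]
            apply pvDead
            rw [pvScanLines_append, h]
            show pvScanLines _ ssh = _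
            simp only [pvScanLines, htel, reduceCtorEq, if_false, if_true, Bool.true_and, Bool.false_and, reduceIte]
          | false =>
            simp only [htel, reduceCtorEq, if_false, if_true, Bool.true_and, Bool.false_and, reduceIte]
            apply ihT
            rw [pvScanLines_append, h]
            show pvScanLines _ ssh = _
            simp only [pvScanLines, htel, reduceCtorEq, if_false, if_true, Bool.true_and, Bool.false_and, reduceIte]

-- ===== VERDICT (by name: the statement is the Claim_ definition above) =====
theorem has_ssh_only_transport_py_spec : Claim_equal_has_ssh_only_transport_py := by
  intro lines _
  unfold Spec_has_ssh_only_transport_py has_ssh_only_transport_py has_ssh_only_transport_py_alt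
  exact (pvMain lines).1 false
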